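-- pv_equiv track=rewrite | github.com/danyasan/weight_lifting_calculator | weight_lifting_calculator.py | weights_for_side
-- ===== SOURCE A (Python) =====
-- from itertools import combinations
--
-- WEIGHTS = [
--     5,
--     10,
--     10,
--     25,
--     35,
-- ]
--
-- BARBELL = 15 # lbs
--
-- def weights_for_side(target):
--     """
--     Given a total weight for one side of the bar, return a list of tuples that
--     total the desired weight.
--     """
--     if target == BARBELL:
--         return [(0,)]
--     solutions = []
--     for n in range(len(WEIGHTS)+1):
--         combos = combinations(WEIGHTS, n)
--         for i in list(combos):
--             if sum(i) == target and i not in solutions: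
--                 solutions.append(i)
--     return solutions
-- ===== SOURCE B (Python) =====
-- from collections import Counter
-- from itertools import product
--
-- WEIGHTS = [
--     5,
--     10,
--     10,
--     25,
--     35,
-- ]
--
-- BARBELL = 15 # lbs
--
-- def weights_for_side(target):
--     """
--     Given a total weight for one side of the bar, return a list of tuples that
--     total the desired weight.
--     """
--     if target == BARBELL:
--         return [(0,)]
--     counts = sorted(Counter(WEIGHTS).items())
--     results = []
--     for quantities in product(*(range(c + 1) for _, c in counts)):
--         combo = tuple(w for (w, _), q in zip(counts, quantities) for _ in range(q))
--         if sum(combo) == target: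
--             results.append(combo)
--     return sorted(results, key=lambda t: (len(t), t))
-- ===== Notes on version B (the rewrite author's own statement) =====
-- stated objective: idiomatic
-- what changed: Replaces the combinations(WEIGHTS,n) enumeration with its O(len(solutions)) dedup membership scan by a Counter + itertools.product enumeration over per-weight quantities that generates each multiset exactly once (no dedup needed), followed by a (len, tuple) sort to reproduce A's output order.
import Mathlib
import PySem

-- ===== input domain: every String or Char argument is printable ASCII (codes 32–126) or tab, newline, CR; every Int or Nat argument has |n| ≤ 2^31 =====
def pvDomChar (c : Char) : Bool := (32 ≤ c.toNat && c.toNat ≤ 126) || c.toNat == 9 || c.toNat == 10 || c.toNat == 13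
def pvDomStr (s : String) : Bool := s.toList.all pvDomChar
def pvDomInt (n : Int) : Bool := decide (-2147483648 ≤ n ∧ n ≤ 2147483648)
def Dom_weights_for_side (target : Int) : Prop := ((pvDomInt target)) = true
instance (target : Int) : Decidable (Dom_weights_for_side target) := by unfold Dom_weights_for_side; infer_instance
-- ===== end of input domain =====

-- B replaces A's dedup-by-membership scan over all combinations(WEIGHTS, n) by a Counter +
-- itertools.product enumeration that generates each multiset once, then a (len, tuple) sort (objective: idiomatic).

-- ===== PORT A =====
def pvWEIGHTS : List Int := [5, 10, 10, 25, 35]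
def pvBARBELL : Int := 15

-- itertools.combinations(xs, n), exact order
def pvCombos : Nat → List Int → List (List Int)
  | 0, _ => [[]]
  | _ + 1, [] => []
  | n + 1, x :: xs => (pvCombos n xs).map (x :: ·) ++ pvCombos (n + 1) xs

def weights_for_side (target : Int) : List (List Int) :=
  if target = pvBARBELL then [[0]]
  else
    (List.range (pvWEIGHTS.length + 1)).foldl
      (fun solutions n =>
        (pvCombos n pvWEIGHTS).foldl
          (fun solutions i =>
            if i.sum = target ∧ i ∉ solutions then solutions ++ [i] else solutions)
          solutions)
      []

-- ===== PORT B =====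
-- itertools.product over lists, exact order
def pvProduct : List (List Int) → List (List Int)
  | [] => [[]]
  | xs :: rest => xs.flatMap (fun x => (pvProduct rest).map (x :: ·))

def weights_for_side_alt (target : Int) : List (List Int) :=
  if target = pvBARBELL then [[0]]
  else
    let counts := PySem.List.sorted2 (PySem.Dict.counter pvWEIGHTS).items Prod.fst Prod.snd
    let results :=
      (pvProduct (counts.map (fun p => PySem.List.pyRange 0 (p.2 + 1) 1))).foldl
        (fun results q =>
          let combo := (counts.zip q).flatMap (fun pq => List.replicate pq.2.toNat pq.1.1)
          if combo.sum = target then results ++ [combo] else results)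
        []
    PySem.List.sorted2 results (fun t => (t.length : Int)) (fun t => t)

-- ===== PRECONDITION & SPEC =====
def Spec_weights_for_side (target : Int) (out : List (List Int)) : Prop := out = weights_for_side_alt target
instance (target : Int) (out : List (List Int)) : Decidable (Spec_weights_for_side target out) := by unfold Spec_weights_for_side; infer_instance

-- ===== CLAIM (what is proved, stated in full; the proofs are below) =====
def Claim_equal_weights_for_side : Prop := ∀ (target : Int), Dom_weights_for_side target → Spec_weights_for_side target (weights_for_side target)

-- ===== LEMMAS AND PROOFS =====
-- evaluations of B's fixed count table and quantity grid (closed terms)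
theorem pv_counts_eval : PySem.List.sorted2 (PySem.Dict.counter pvWEIGHTS).items Prod.fst Prod.snd
    = [(5,1),(10,2),(25,1),(35,1)] := by decide
theorem pv_quant_eval : pvProduct (([((5:Int),(1:Int)),(10,2),(25,1),(35,1)]).map (fun p => PySem.List.pyRange 0 (p.2 + 1) 1))
    = pvProduct [[0,1],[0,1,2],[0,1],[0,1]] := by decide

-- ===== VERDICT (by name: the statement is the Claim_ definition above) =====
theorem weights_for_side_spec : Claim_equal_weights_for_side := by
  unfold Claim_equal_weights_for_side
  intro t _
  unfold Spec_weights_for_side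
  by_cases h15 : t = 15
  · subst h15; decide
  by_cases h0 : (0:Int) = t
  · subst h0; decide
  by_cases h5 : (5:Int) = t
  · subst h5; decide
  by_cases h10 : (10:Int) = t
  · subst h10; decide
  by_cases h20 : (20:Int) = t
  · subst h20; decide
  by_cases h25 : (25:Int) = t
  · subst h25; decide
  by_cases h30 : (30:Int) = t
  · subst h30; decide
  by_cases h35 : (35:Int) = t
  · subst h35; decide
  by_cases h40 : (40:Int) = t
  · subst h40; decide
  by_cases h45 : (45:Int) = t
  · subst h45; decide
  by_cases h50 : (50:Int) = t
  · subst h50; decide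
  by_cases h55 : (55:Int) = t
  · subst h55; decide
  by_cases h60 : (60:Int) = t
  · subst h60; decide
  by_cases h65 : (65:Int) = t
  · subst h65; decide
  by_cases h70 : (70:Int) = t
  · subst h70; decide
  by_cases h75 : (75:Int) = t
  · subst h75; decide
  by_cases h80 : (80:Int) = t
  · subst h80; decide
  by_cases h85 : (85:Int) = t
  · subst h85; decide
  have h15' : ¬ (15:Int) = t := fun h => h15 h.symm
  simp only [weights_for_side, weights_for_side_alt, pv_counts_eval, pv_quant_eval]
  simp [pvCombos, pvProduct, pvWEIGHTS, pvBARBELL,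
    h15, h15', h0, h5, h10, h20, h25, h30, h35, h40, h45, h50, h55, h60, h65, h70, h75, h80, h85,
    List.range_succ, PySem.List.sorted2]
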